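-- pv_equiv track=rewrite | github.com/alexandraback/datacollection | solutions_1484496_0/Python/Nika86/EqSum.py | eq0
-- ===== SOURCE A (Python) =====
-- def eq0(N,L,S):
--     ans = [];
--     allzeros = True;
--     sumset = 0;
--     if (len(L) < N):
--         ans = eq0(N,L+[0],S);
--         if ( len(ans) == 0 ):
--             ans = eq0(N,L+[-1],S);
--         if ( len(ans) == 0 ):
--             ans = eq0(N,L+[1],S);
--         return ans;
--     else:
--         for n in range(N):
--             sumset += (L[n]*S[n]);
--             if (L[n] != 0):
--                 allzeros = False;
--         if ((sumset == 0) and (allzeros == False)):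
--             return L;
--         else:
--             return [];
-- ===== SOURCE B (Python) =====
-- def eq0(N, L, S):
--     # Enumerate candidate vectors by counting t = 0 .. 3**m - 1 in base 3
--     # (digit map [0, -1, 1], most significant digit first), which visits the
--     # candidates in exactly the DFS preorder of the recursive search.
--     n = max(N, 0)
--     digits = [0, -1, 1]
--
--     def good(cand):
--         head = cand[:n]
--         return sum(c * w for c, w in zip(head, S)) == 0 and any(c != 0 for c in head)
--
--     if len(L) < N:
--         m = N - len(L)
--         for t in range(3 ** m):
--             suffix = [digits[(t // 3 ** p) % 3] for p in range(m - 1, -1, -1)]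
--             cand = L + suffix
--             if good(cand):
--                 return cand
--         return []
--     return L if good(L) else []
-- ===== Notes on version B (the rewrite author's own statement) =====
-- stated objective: alternative
-- what changed: Replaces the recursive DFS with chained empty-result retries by a single loop that counts t = 0..3^m-1 and decodes each t in base 3 (digit map [0,-1,1], most significant first) into the candidate suffix, visiting candidates in the same preorder and returning the first zero-weighted-sum nonzero vector.
import Mathlib
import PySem

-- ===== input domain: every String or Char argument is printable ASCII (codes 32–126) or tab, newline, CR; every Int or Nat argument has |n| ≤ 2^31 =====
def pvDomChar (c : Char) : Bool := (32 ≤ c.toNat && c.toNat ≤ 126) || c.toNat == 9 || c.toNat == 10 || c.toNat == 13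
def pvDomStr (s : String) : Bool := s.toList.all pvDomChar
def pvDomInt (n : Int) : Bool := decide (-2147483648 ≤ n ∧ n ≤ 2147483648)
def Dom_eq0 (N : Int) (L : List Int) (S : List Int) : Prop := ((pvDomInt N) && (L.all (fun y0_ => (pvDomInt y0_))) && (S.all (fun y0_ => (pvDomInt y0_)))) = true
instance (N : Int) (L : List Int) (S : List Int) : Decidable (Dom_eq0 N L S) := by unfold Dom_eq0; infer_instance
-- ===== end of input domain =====

-- B replaces A's recursive DFS with a single base-3 counter enumeration of the
-- candidate vectors (same preorder), scanned once for the first zero-sum nonzero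
-- vector; objective: alternative (same 3^m cost, no recursion).


-- ===== PORT A =====
-- termination measure lemma for the port's recursion (cited by decreasing_by)
theorem eq0_dec (N : Int) (l : Nat) (h : (l : Int) < N) :
    (N - ((l : Int) + 1)).toNat < (N - (l : Int)).toNat := by omega

def eq0 (N : Int) (L : List Int) (S : List Int) : List Int :=
  if _h : (L.length : Int) < N then
    let ans := eq0 N (L ++ [0]) S
    let ans := if ans.length = 0 then eq0 N (L ++ [-1]) S else ans
    if ans.length = 0 then eq0 N (L ++ [1]) S else ans
  else
    -- for n in range(N): sumset += L[n]*S[n]; if L[n] != 0: allzeros = False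
    let p := (PySem.List.pyRange 0 N 1).foldl
      (fun st n => (st.1 + PySem.List.pyGetD L n 0 * PySem.List.pyGetD S n 0,
                    if PySem.List.pyGetD L n 0 ≠ 0 then false else st.2))
      ((0 : Int), true)
    if p.1 = 0 ∧ p.2 = false then L else []
termination_by (N - L.length).toNat
decreasing_by
  · exact (by simpa using eq0_dec N L.length _h)
  · exact (by simpa using eq0_dec N L.length _h)
  · exact (by simpa using eq0_dec N L.length _h)

-- ===== PORT B =====
-- head = cand[:n] with n = max(N,0), sum(c*w for c,w in zip(head,S)) == 0 and any(c != 0 for c in head)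
def eq0Good (n : Nat) (S : List Int) (cand : List Int) : Bool :=
  let head := cand.take n
  (((head.zip S).foldl (fun a cw => a + cw.1 * cw.2) 0) == 0) && head.any (fun c => c != 0)

-- [digits[(t // 3 ** p) % 3] for p in range(m - 1, -1, -1)]  (p ≥ 0 throughout, so 3 ** p = 3 ^ p.toNat exactly)
def eq0Decode (m : Int) (t : Int) : List Int :=
  (PySem.List.pyRange (m - 1) (-1) (-1)).map
    (fun p => PySem.List.pyGetD [0, -1, 1] (PySem.Int.mod (PySem.Int.floordiv t ((3 : Int) ^ p.toNat)) 3) 0)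

-- the early-return for-loop over range(3 ** m)
def eq0Scan (L : List Int) (g : List Int → Bool) (dec : Int → List Int) : List Int → List Int
  | [] => []
  | t :: ts => let cand := L ++ dec t
               if g cand then cand else eq0Scan L g dec ts

def eq0_alt (N : Int) (L : List Int) (S : List Int) : List Int :=
  let n := N.toNat  -- n = max(N, 0)
  if (L.length : Int) < N then
    let m := N - L.length  -- m > 0 here, so 3 ** m = 3 ^ m.toNat exactly
    eq0Scan L (eq0Good n S) (eq0Decode m) (PySem.List.pyRange 0 ((3 : Int) ^ m.toNat) 1)
  else if eq0Good n S L then L else []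

-- ===== PRECONDITION & SPEC =====
-- Pre_ excludes exactly the inputs where A raises IndexError: the base case reads S[n] for n < N.
def Pre_eq0 (N : Int) (L : List Int) (S : List Int) : Prop := N ≤ (S.length : Int)
instance (N : Int) (L : List Int) (S : List Int) : Decidable (Pre_eq0 N L S) := by unfold Pre_eq0; infer_instance

def pvWitness_eq0 : Int × List Int × List Int := (2, [], [1, 1])

def Spec_eq0 (N : Int) (L : List Int) (S : List Int) (out : List Int) : Prop := out = eq0_alt N L S
instance (N : Int) (L : List Int) (S : List Int) (out : List Int) : Decidable (Spec_eq0 N L S out) := by unfold Spec_eq0; infer_instance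

-- ===== CLAIM (what is proved, stated in full; the proofs are below) =====
def Claim_equal_eq0 : Prop := ∀ (N : Int) (L : List Int) (S : List Int), Dom_eq0 N L S → Pre_eq0 N L S → Spec_eq0 N L S (eq0 N L S)

-- ===== LEMMAS AND PROOFS =====

-- proof-only helpers: the DFS candidate tree flattened in preorder
def eq0Sfx : Nat → List (List Int)
  | 0 => [[]]
  | m+1 => [0, -1, 1].flatMap (fun d => (eq0Sfx m).map (fun s => d :: s))

def eq0FirstHit (L : List Int) (g : List Int → Bool) : List (List Int) → List Int
  | [] => []
  | s :: ss => if g (L ++ s) then L ++ s else eq0FirstHit L g ss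

theorem eq0Good_ne_nil {n : Nat} {S c : List Int} (h : eq0Good n S c = true) : c ≠ [] := by
  intro hc; subst hc; simp [eq0Good] at h

theorem eq0FirstHit_map_cons (L : List Int) (g : List Int → Bool) (d : Int)
    (ss : List (List Int)) :
    eq0FirstHit L g (ss.map (fun s => d :: s)) = eq0FirstHit (L ++ [d]) g ss := by
  induction ss with
  | nil => rfl
  | cons s ss ih =>
      simp only [List.map_cons, eq0FirstHit]
      rw [show L ++ d :: s = (L ++ [d]) ++ s by simp, ih]

theorem eq0FirstHit_append (L : List Int) (g : List Int → Bool)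
    (hg : ∀ c, g c = true → c ≠ []) (ss ts : List (List Int)) :
    eq0FirstHit L g (ss ++ ts) =
      if eq0FirstHit L g ss = [] then eq0FirstHit L g ts else eq0FirstHit L g ss := by
  induction ss with
  | nil => simp [eq0FirstHit]
  | cons s ss ih =>
      by_cases h : g (L ++ s) = true
      · have hne : L ++ s ≠ [] := hg _ h
        simp [eq0FirstHit, h, hne]
      · simp only [List.cons_append, eq0FirstHit, h, Bool.false_eq_true, if_false, ih]

theorem eq0_zip_take_left : ∀ (m : Nat) (L S : List Int),
    (L.take m).zip S = (L.zip S).take m := by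
  intro m
  induction m with
  | zero => intro L S; simp
  | succ m ih =>
      intro L S
      cases L with
      | nil => simp
      | cons a L =>
          cases S with
          | nil => simp
          | cons b S => simp [List.take_succ_cons, ih]

theorem eq0_foldb (L S : List Int) (m : Nat) (hL : m ≤ L.length) (hS : m ≤ S.length) :
    (List.range m).foldl
      (fun st (i : Nat) => (st.1 + L.getD i 0 * S.getD i 0,
        if L.getD i 0 ≠ 0 then false else st.2)) ((0 : Int), true)
    = (((L.take m).zip S).foldl (fun a cw => a + cw.1 * cw.2) 0,
       !((L.take m).any (fun c => c != 0))) := by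
  induction m with
  | zero => simp
  | succ m ih =>
      have hm : m < L.length := by omega
      have hms : m < S.length := by omega
      rw [List.range_succ, List.foldl_append, ih (by omega) (by omega)]
      have hz : (L.take (m+1)).zip S = (L.take m).zip S ++ [(L[m], S[m])] := by
        rw [eq0_zip_take_left, eq0_zip_take_left, List.take_succ,
            List.getElem?_eq_getElem (by simp [hm, hms] : m < (L.zip S).length)]
        simp [List.getElem_zip]
      rw [hz, List.foldl_append, List.take_succ, List.getElem?_eq_getElem hm]
      simp only [List.foldl_cons, List.foldl_nil, Option.toList_some, List.any_append,
        List.any_cons, List.any_nil, Bool.or_false]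
      rw [List.getD_eq_getElem L 0 hm, List.getD_eq_getElem S 0 hms]
      by_cases h0 : L[m] = 0 <;> simp [h0]

theorem eq0_base (N : Int) (L S : List Int) (hNL : N ≤ (L.length : Int))
    (hNS : N ≤ (S.length : Int)) :
    eq0 N L S = if eq0Good N.toNat S L then L else [] := by
  rw [eq0, dif_neg (by omega)]
  have hr : PySem.List.pyRange 0 N 1 = (List.range N.toNat).map (fun k : Nat => (k : Int)) := by
    rw [PySem.List.pyRange_one]
    simp
  rw [hr, List.foldl_map]
  simp only [PySem.List.pyGetD_natCast]
  rw [eq0_foldb L S N.toNat (by omega) (by omega)]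
  simp only [eq0Good]
  by_cases hs : ((L.take N.toNat).zip S).foldl (fun a cw => a + cw.1 * cw.2) 0 = 0 <;>
    by_cases ha : (L.take N.toNat).any (fun c => c != 0) = true <;>
      simp [hs, ha]

theorem eq0_main (N : Int) (S : List Int) (hNS : N ≤ (S.length : Int)) :
    ∀ (k : Nat) (L : List Int), (L.length : Int) + k = N →
      eq0 N L S = eq0FirstHit L (eq0Good N.toNat S) (eq0Sfx k) := by
  intro k
  induction k with
  | zero =>
      intro L hL
      rw [eq0_base N L S (by omega) hNS]
      simp [eq0Sfx, eq0FirstHit]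
  | succ k ih =>
      intro L hL
      have hlt : (L.length : Int) < N := by omega
      rw [eq0, dif_pos hlt]
      have h0 := ih (L ++ [0]) (by simp; omega)
      have h1 := ih (L ++ [-1]) (by simp; omega)
      have h2 := ih (L ++ [1]) (by simp; omega)
      have hg : ∀ c, eq0Good N.toNat S c = true → c ≠ [] := fun c hc => eq0Good_ne_nil hc
      have hsfx : eq0Sfx (k+1) = ((eq0Sfx k).map (fun s => (0:Int) :: s))
          ++ (((eq0Sfx k).map (fun s => (-1:Int) :: s))
            ++ ((eq0Sfx k).map (fun s => (1:Int) :: s))) := by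
        simp [eq0Sfx]
      rw [hsfx, eq0FirstHit_append _ _ hg, eq0FirstHit_append _ _ hg,
          eq0FirstHit_map_cons, eq0FirstHit_map_cons, eq0FirstHit_map_cons,
          ← h0, ← h1, ← h2]
      simp only [List.length_eq_zero_iff]
      by_cases e0 : eq0 N (L ++ [0]) S = [] <;> by_cases e1 : eq0 N (L ++ [-1]) S = [] <;>
        simp [e0, e1]

theorem eq0Decode_shift (k : Nat) (d r : Int) (hd0 : 0 ≤ d) (hd : d < 3)
    (hr0 : 0 ≤ r) (hr : r < (3:Int) ^ k) :
    eq0Decode ((k:Int)+1) (d * 3 ^ k + r)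
      = PySem.List.pyGetD [0, -1, 1] d 0 :: eq0Decode (k:Int) r := by
  have h3 : (0:Int) < 3 ^ k := by positivity
  simp only [eq0Decode, add_sub_cancel_right]
  rw [PySem.List.pyRange_neg_one_cons (by omega : (-1:Int) < (k:Int))]
  simp only [List.map_cons]
  congr 1
  · -- head digit
    rw [Int.toNat_natCast, PySem.Int.floordiv_eq_ediv_of_pos h3,
        show d * 3 ^ k + r = r + d * 3 ^ k by ring,
        Int.add_mul_ediv_right _ _ (by omega : (3:Int)^k ≠ 0),
        Int.ediv_eq_zero_of_lt hr0 hr, zero_add,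
        PySem.Int.mod_eq_emod_of_pos (by omega), Int.emod_eq_of_lt hd0 hd]
  · -- remaining digits
    apply List.map_congr_left
    intro p hp
    rw [PySem.List.mem_pyRange_neg_one] at hp
    have hp0 : 0 ≤ p := by omega
    have hpk : p.toNat < k := by omega
    set q := p.toNat with hq
    have hqpow : (0:Int) < 3 ^ q := by positivity
    congr 1
    obtain ⟨e, rfl⟩ : ∃ e, k = e + 1 + q := ⟨k - q - 1, by omega⟩
    have hsplit : d * 3 ^ (e + 1 + q) + r = (r + 3 ^ q * (3 * (d * 3 ^ e))) := by
      rw [pow_add, pow_add, pow_one]; ring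
    rw [hsplit, PySem.Int.floordiv_eq_ediv_of_pos hqpow,
        PySem.Int.floordiv_eq_ediv_of_pos hqpow,
        show r + 3 ^ q * (3 * (d * 3 ^ e)) = r + (3 * (d * 3 ^ e)) * 3 ^ q by ring,
        Int.add_mul_ediv_right _ _ (by omega : (3:Int)^q ≠ 0),
        PySem.Int.mod_eq_emod_of_pos (by omega : (0:Int) < 3),
        PySem.Int.mod_eq_emod_of_pos (by omega : (0:Int) < 3),
        show r / 3 ^ q + 3 * (d * 3 ^ e) = r / 3 ^ q + 3 * (d * 3 ^ e) by rfl,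
        Int.add_mul_emod_self_left]

theorem eq0Decode_sfx : ∀ (k : Nat),
    (PySem.List.pyRange 0 ((3:Int) ^ k) 1).map (eq0Decode (k:Int)) = eq0Sfx k := by
  intro k
  induction k with
  | zero => rfl
  | succ k ih =>
      have h3 : (0:Int) < 3 ^ k := by positivity
      have hchunk : ∀ (d : Int), 0 ≤ d → d < 3 →
          (PySem.List.pyRange (d * 3 ^ k) ((d + 1) * 3 ^ k) 1).map (eq0Decode ((k:Int)+1))
            = (eq0Sfx k).map (fun s => PySem.List.pyGetD [0, -1, 1] d 0 :: s) := by
        intro d hd0 hd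
        rw [← ih, PySem.List.pyRange_one, PySem.List.pyRange_one]
        simp only [List.map_map, sub_zero,
          show ((d + 1) * 3 ^ k - d * 3 ^ k) = (3:Int) ^ k by ring]
        apply List.map_congr_left
        intro j hj
        rw [List.mem_range] at hj
        have hj3 : ((j:Int)) < 3 ^ k := by
          have : ((j:Nat):Int) < ((3^k : Nat) : Int) := by exact_mod_cast hj
          simpa [Nat.cast_pow] using this
        simp only [Function.comp_apply, zero_add]
        exact eq0Decode_shift k d j hd0 hd (by positivity) hj3
      have h31 : (3:Int) ^ (k+1) = 3 * 3 ^ k := by ring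
      have hA : PySem.List.pyRange 0 ((3:Int) ^ (k+1)) 1
          = PySem.List.pyRange 0 ((3:Int) ^ k) 1
            ++ PySem.List.pyRange ((3:Int) ^ k) ((3:Int) ^ (k+1)) 1 :=
        PySem.List.pyRange_one_append _ _ _ (by omega) (by omega)
      have hB : PySem.List.pyRange ((3:Int) ^ k) ((3:Int) ^ (k+1)) 1
          = PySem.List.pyRange ((3:Int) ^ k) (2 * (3:Int) ^ k) 1
            ++ PySem.List.pyRange (2 * (3:Int) ^ k) ((3:Int) ^ (k+1)) 1 :=
        PySem.List.pyRange_one_append _ _ _ (by omega) (by omega)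
      have hc0 := hchunk 0 (by omega) (by omega)
      have hc1 := hchunk 1 (by omega) (by omega)
      have hc2 := hchunk 2 (by omega) (by omega)
      rw [show ((0:Int)) * 3 ^ k = 0 by ring, show ((0:Int) + 1) * 3 ^ k = 3 ^ k by ring] at hc0
      rw [show ((1:Int)) * 3 ^ k = 3 ^ k by ring,
          show ((1:Int) + 1) * 3 ^ k = 2 * 3 ^ k by ring] at hc1
      rw [show ((2:Int)) * 3 ^ k = 2 * 3 ^ k by ring,
          show ((2:Int) + 1) * 3 ^ k = 3 ^ (k+1) by ring] at hc2
      have hcast : ((k+1 : Nat) : Int) = (k:Int) + 1 := by push_cast; ring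
      rw [hcast, hA, hB]
      simp only [List.map_append]
      rw [hc0, hc1, hc2]
      have hD0 : PySem.List.pyGetD [0, -1, 1] (0:Int) 0 = 0 := by decide
      have hD1 : PySem.List.pyGetD [0, -1, 1] (1:Int) 0 = -1 := by decide
      have hD2 : PySem.List.pyGetD [0, -1, 1] (2:Int) 0 = 1 := by decide
      simp only [hD0, hD1, hD2]
      simp [eq0Sfx]

theorem eq0Scan_eq (L : List Int) (g : List Int → Bool) (dec : Int → List Int)
    (ts : List Int) : eq0Scan L g dec ts = eq0FirstHit L g (ts.map dec) := by
  induction ts with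
  | nil => rfl
  | cons t ts ih => simp only [eq0Scan, List.map_cons, eq0FirstHit, ih]

-- ===== VERDICT (by name: the statement is the Claim_ definition above) =====
theorem eq0_spec : Claim_equal_eq0 := by
  intro N L S _hdom hpre
  unfold Pre_eq0 at hpre
  unfold Spec_eq0 eq0_alt
  by_cases h : (L.length : Int) < N
  · rw [if_pos h, eq0Scan_eq]
    have hm : N - (L.length : Int) = (((N - L.length).toNat : Nat) : Int) := by omega
    rw [hm]
    simp only [Int.toNat_natCast]
    rw [eq0Decode_sfx]
    exact eq0_main N S hpre _ L (by omega)
  · rw [if_neg h]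
    exact eq0_base N L S (by omega) hpre
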